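-- pv_equiv track=rewrite | github.com/swade1/animal-humane-static-demo | animal-humane/main_new_backup_20250925_105842.py | format_dog_groups
-- ===== SOURCE A (Python) =====
-- def format_dog_groups(dog_groups):
--     lines = []
--
--     lines.append("New Dogs:")
--     for dog in dog_groups.get('new_dogs', []):
--         name = dog.get('name', 'Unnamed Dog')
--         url = dog.get('url', 'No URL')
--         lines.append(f"  {name} - {url}")
--     lines.append("")  # blank line
--
--     lines.append("Adopted/Reclaimed Dogs:")
--     for dog in dog_groups.get('adopted_dogs', []):
--         name = dog.get('name', 'Unnamed Dog')
--         url = dog.get('url', 'No URL')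
--         lines.append(f"  {name} - {url}")
--     lines.append("")
--
--     lines.append("Trial Adoptions:")
--     for dog in dog_groups.get('trial_adoption_dogs', []):
--         name = dog.get('name', 'Unnamed Dog')
--         url = dog.get('url', 'No URL')
--         lines.append(f"  {name} - {url}")
--     lines.append("")
--
--     lines.append("Other Unlisted Dogs:")
--     for dog in dog_groups.get('other_unlisted_dogs', []):
--         name = dog.get('name', 'Unnamed Dog')
--         url = dog.get('url', 'No URL')
--         lines.append(f"  {name} - {url}")
--     lines.append("")
--
--     return "\n".join(lines)
-- ===== SOURCE B (Python) =====
-- def format_dog_groups(dog_groups):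
--     # Build per-section text blocks (header plus newline-prefixed dog lines,
--     # computed recursively), then join blocks with a blank-line separator and
--     # add the final trailing newline.
--     def dog_lines(dogs):
--         if not dogs:
--             return ""
--         d = dogs[0]
--         return ("\n  " + d.get('name', 'Unnamed Dog') + " - "
--                 + d.get('url', 'No URL') + dog_lines(dogs[1:]))
--
--     def blocks(specs):
--         if not specs:
--             return []
--         header, key = specs[0]
--         return [header + dog_lines(dog_groups.get(key, []))] + blocks(specs[1:])
--
--     return "\n\n".join(blocks([
--         ("New Dogs:", "new_dogs"),
--         ("Adopted/Reclaimed Dogs:", "adopted_dogs"),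
--         ("Trial Adoptions:", "trial_adoption_dogs"),
--         ("Other Unlisted Dogs:", "other_unlisted_dogs"),
--     ])) + "\n"
-- ===== Notes on version B (the rewrite author's own statement) =====
-- stated objective: alternative
-- what changed: Instead of accumulating a flat list of lines and joining with a newline, B recursively builds one text block string per section (header plus newline-prefixed dog lines) and joins the four blocks with a blank-line separator '\n\n' plus one trailing newline; correctness rests on the fact that A's joined line list always ends each section with an empty line.
import Mathlib
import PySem

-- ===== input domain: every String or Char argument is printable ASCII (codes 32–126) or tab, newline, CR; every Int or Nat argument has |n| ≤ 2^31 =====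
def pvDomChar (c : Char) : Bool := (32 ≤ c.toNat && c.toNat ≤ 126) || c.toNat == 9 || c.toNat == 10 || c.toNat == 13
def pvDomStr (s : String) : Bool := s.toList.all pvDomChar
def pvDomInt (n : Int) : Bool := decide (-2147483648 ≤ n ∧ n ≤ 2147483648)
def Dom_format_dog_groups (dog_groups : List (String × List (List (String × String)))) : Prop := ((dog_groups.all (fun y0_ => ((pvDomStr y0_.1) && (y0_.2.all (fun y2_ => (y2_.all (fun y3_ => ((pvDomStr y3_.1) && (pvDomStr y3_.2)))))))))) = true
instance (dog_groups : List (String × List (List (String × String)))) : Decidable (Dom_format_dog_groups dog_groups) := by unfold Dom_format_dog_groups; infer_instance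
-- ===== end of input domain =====

-- B builds one text block per section recursively and joins the blocks with a blank-line separator plus a trailing newline, instead of A's flat line list joined by '\n' (objective: alternative).


-- shared primitive: Python dict.get(k, dflt) on an association list (first match)
def pyDictGetD {ν : Type} (d : List (String × ν)) (k : String) (dflt : ν) : ν :=
  match d.find? (fun p => p.1 == k) with
  | some p => p.2
  | none => dflt

-- ===== PORT A =====
def format_dog_groups (dog_groups : List (String × List (List (String × String)))) : String :=
  let lines : List String := []
  let lines := lines ++ ["New Dogs:"]
  let lines := (pyDictGetD dog_groups "new_dogs" []).foldl (fun acc dog =>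
      let name := pyDictGetD dog "name" "Unnamed Dog"
      let url := pyDictGetD dog "url" "No URL"
      acc ++ ["  " ++ name ++ " - " ++ url]) lines
  let lines := lines ++ [""]
  let lines := lines ++ ["Adopted/Reclaimed Dogs:"]
  let lines := (pyDictGetD dog_groups "adopted_dogs" []).foldl (fun acc dog =>
      let name := pyDictGetD dog "name" "Unnamed Dog"
      let url := pyDictGetD dog "url" "No URL"
      acc ++ ["  " ++ name ++ " - " ++ url]) lines
  let lines := lines ++ [""]
  let lines := lines ++ ["Trial Adoptions:"]
  let lines := (pyDictGetD dog_groups "trial_adoption_dogs" []).foldl (fun acc dog =>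
      let name := pyDictGetD dog "name" "Unnamed Dog"
      let url := pyDictGetD dog "url" "No URL"
      acc ++ ["  " ++ name ++ " - " ++ url]) lines
  let lines := lines ++ [""]
  let lines := lines ++ ["Other Unlisted Dogs:"]
  let lines := (pyDictGetD dog_groups "other_unlisted_dogs" []).foldl (fun acc dog =>
      let name := pyDictGetD dog "name" "Unnamed Dog"
      let url := pyDictGetD dog "url" "No URL"
      acc ++ ["  " ++ name ++ " - " ++ url]) lines
  let lines := lines ++ [""]
  PySem.Str.join "\n" lines

-- ===== PORT B =====
-- dog_lines: newline-prefixed "  name - url" lines for one section, built recursively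
def pvDogLines (dogs : List (List (String × String))) : String :=
  match dogs with
  | [] => ""
  | d :: rest =>
      "\n  " ++ pyDictGetD d "name" "Unnamed Dog" ++ " - " ++ pyDictGetD d "url" "No URL"
        ++ pvDogLines rest

-- blocks: one text block (header plus its dog lines) per section spec, built recursively
def pvBlocks (dog_groups : List (String × List (List (String × String))))
    (specs : List (String × String)) : List String :=
  match specs with
  | [] => []
  | (header, key) :: rest =>
      (header ++ pvDogLines (pyDictGetD dog_groups key [])) :: pvBlocks dog_groups rest

def format_dog_groups_alt (dog_groups : List (String × List (List (String × String)))) : String :=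
  PySem.Str.join "\n\n" (pvBlocks dog_groups
    [("New Dogs:", "new_dogs"),
     ("Adopted/Reclaimed Dogs:", "adopted_dogs"),
     ("Trial Adoptions:", "trial_adoption_dogs"),
     ("Other Unlisted Dogs:", "other_unlisted_dogs")]) ++ "\n"

-- ===== PRECONDITION & SPEC =====
def Spec_format_dog_groups (dog_groups : List (String × List (List (String × String)))) (out : String) : Prop := out = format_dog_groups_alt dog_groups
instance (dog_groups : List (String × List (List (String × String)))) (out : String) : Decidable (Spec_format_dog_groups dog_groups out) := by unfold Spec_format_dog_groups; infer_instance

-- ===== CLAIM (what is proved, stated in full; the proofs are below) =====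
def Claim_equal_format_dog_groups : Prop := ∀ (dog_groups : List (String × List (List (String × String)))), Dom_format_dog_groups dog_groups → Spec_format_dog_groups dog_groups (format_dog_groups dog_groups)

-- ===== LEMMAS AND PROOFS =====
-- join with separator sep, peeled off the head: the tail contributes sep-prefixed pieces
theorem pv_join_cons (sep x : List Char) (ys : List (List Char)) :
    PySem.Chars.join sep (x :: ys) = x ++ ys.flatMap (fun y => sep ++ y) := by
  induction ys generalizing x with
  | nil => simp [PySem.Chars.join_singleton]
  | cons y ys ih => simp [PySem.Chars.join_cons_cons, ih, List.append_assoc]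

theorem pv_nl2 : ("\n\n":String).toList = ("\n":String).toList ++ ("\n":String).toList := by decide

theorem pv_nlsp : ("\n  ":String).toList = ("\n":String).toList ++ ("  ":String).toList := by decide

-- B's recursive dog_lines, char-level: a flatMap of newline-prefixed A-style lines
theorem pv_dogLines_toList (dogs : List (List (String × String))) :
    (pvDogLines dogs).toList =
      dogs.flatMap (fun d =>
        ("\n":String).toList ++
          ("  " ++ pyDictGetD d "name" "Unnamed Dog" ++ " - " ++ pyDictGetD d "url" "No URL").toList) := by
  induction dogs with
  | nil => simp [pvDogLines]
  | cons d rest ih =>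
      simp [pvDogLines, ih, pv_nlsp, List.append_assoc]

theorem pv_flatten_map_singleton {α β : Type} (f : α → β) (l : List α) :
    (l.map (fun x => [f x])).flatten = l.map f := by
  induction l with
  | nil => rfl
  | cons x xs ih => simp [ih]

-- ===== VERDICT (by name: the statement is the Claim_ definition above) =====
theorem format_dog_groups_spec : Claim_equal_format_dog_groups := by
  intro dg _
  unfold Spec_format_dog_groups
  refine String.toList_inj.mp ?_
  unfold format_dog_groups format_dog_groups_alt
  simp [PySem.Str.toList_join, pvBlocks, pv_join_cons, pv_dogLines_toList, pv_nl2,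
        pv_flatten_map_singleton, Function.comp, List.flatMap_map, List.append_assoc]
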